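-- pv_equiv track=rewrite | github.com/thatMissingSock/dataStructureAndAlgorithmsRevision | week 3 (Recursion)/geometricSeries 1 + a + ab + abc + ....py | iterativeGeomSeries
-- ===== SOURCE A (Python) =====
-- def iterativeGeomSeries(x):
--     """
--     This is the same as before but done iteratively as the first equation:
--     Let us say x = [2, 12, 3, 4, 5] then this can be seen as [a, b, c, d, e].
--     Then we can find out the sum of the equation, which would be (a + ab + abc + abcd + abcde).
--     :param x: A list.
--     :return: The sum of x using the geometricSeries formula.
--     """
--     if x == []:
--         return 0
--
--     tempOutput = 0
--     for i in range(len(x)):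
--         tempSum = x[i]
--         if i > 0:
--             for j in range(i):
--                 tempSum *= x[j]
--         tempOutput += tempSum
--
--     return tempOutput
-- ===== SOURCE B (Python) =====
-- def iterativeGeomSeries(x):
--     total = 0
--     prod = 1
--     for v in x:
--         prod *= v
--         total += prod
--     return total
-- ===== Notes on version B (the rewrite author's own statement) =====
-- stated objective: faster
-- what changed: Replaces the nested loop that recomputes each prefix product from scratch with a single pass maintaining a running product and accumulating the sum.
import Mathlib
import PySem

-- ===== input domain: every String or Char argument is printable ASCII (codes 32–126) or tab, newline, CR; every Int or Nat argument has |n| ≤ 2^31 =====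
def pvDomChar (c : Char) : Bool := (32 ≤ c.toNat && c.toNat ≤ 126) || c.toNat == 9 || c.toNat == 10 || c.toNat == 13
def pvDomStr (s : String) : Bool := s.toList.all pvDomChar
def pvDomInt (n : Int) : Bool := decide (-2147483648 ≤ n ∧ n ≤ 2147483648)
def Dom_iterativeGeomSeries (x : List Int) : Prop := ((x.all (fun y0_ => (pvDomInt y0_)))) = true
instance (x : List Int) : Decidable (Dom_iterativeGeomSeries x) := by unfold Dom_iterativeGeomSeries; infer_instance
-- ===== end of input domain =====

-- B replaces A's quadratic nested loops (recomputing each prefix product from scratch)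
-- with a single pass maintaining a running product; objective: faster (asymptotic).


-- ===== PORT A =====
-- literal port: empty-list check, outer loop over range(len(x)), inner loop over range(i)
-- rebuilding the product x[0]*…*x[i-1]; indices are in range so x.getD i 0 = x[i].
def iterativeGeomSeries (x : List Int) : Int :=
  if x = [] then 0
  else
    (List.range x.length).foldl
      (fun tempOutput i =>
        let tempSum := x.getD i 0
        let tempSum :=
          if 0 < i then (List.range i).foldl (fun s j => s * x.getD j 0) tempSum
          else tempSum
        tempOutput + tempSum) 0

-- ===== PORT B =====
-- literal port of Source B: one fold carrying (running product, running total).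
def iterativeGeomSeries_alt (x : List Int) : Int :=
  (x.foldl (fun (ps : Int × Int) v => (ps.1 * v, ps.2 + ps.1 * v)) (1, 0)).2

-- ===== PRECONDITION & SPEC =====
def Spec_iterativeGeomSeries (x : List Int) (out : Int) : Prop := out = iterativeGeomSeries_alt x
instance (x : List Int) (out : Int) : Decidable (Spec_iterativeGeomSeries x out) := by unfold Spec_iterativeGeomSeries; infer_instance

-- ===== CLAIM (what is proved, stated in full; the proofs are below) =====
def Claim_equal_iterativeGeomSeries : Prop := ∀ (x : List Int), Dom_iterativeGeomSeries x → Spec_iterativeGeomSeries x (iterativeGeomSeries x)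

-- ===== LEMMAS AND PROOFS =====

-- the mathematical value both programs compute: sum of prefix products
def pvS : List Int → Int
  | [] => 0
  | v :: t => v * (1 + pvS t)

theorem pvB_inv (x : List Int) : ∀ p s : Int,
    (x.foldl (fun (ps : Int × Int) v => (ps.1 * v, ps.2 + ps.1 * v)) (p, s)).2 = s + p * pvS x := by
  induction x with
  | nil => intro p s; simp [pvS]
  | cons v t ih =>
    intro p s
    simp only [List.foldl_cons, pvS, ih]
    ring

theorem pvFoldl_congr {α β : Type} (l : List α) (f g : β → α → β) :
    ∀ a : β, (∀ i ∈ l, ∀ b, f b i = g b i) → l.foldl f a = l.foldl g a := by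
  induction l with
  | nil => intro a _; rfl
  | cons v t ih =>
    intro a h
    simp only [List.foldl_cons]
    rw [h v (List.mem_cons_self) a]
    exact ih _ (fun i hi b => h i (List.mem_cons_of_mem _ hi) b)

theorem pvFoldl_add {α : Type} (g : α → Int) (l : List α) : ∀ a : Int,
    l.foldl (fun acc i => acc + g i) a = a + (l.map g).sum := by
  induction l with
  | nil => intro a; simp
  | cons v t ih => intro a; simp [ih]; ring

theorem pvTake_succ_prod (x : List Int) (i : ℕ) (h : i < x.length) :
    (x.take (i + 1)).prod = (x.take i).prod * x.getD i 0 := by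
  rw [List.take_succ, List.prod_append, List.getElem?_eq_getElem h]
  simp [List.getD, List.getElem?_eq_getElem h]

theorem pvInner (x : List Int) (i : ℕ) (hi : i ≤ x.length) : ∀ t : Int,
    (List.range i).foldl (fun s j => s * x.getD j 0) t = t * (x.take i).prod := by
  induction i with
  | zero => intro t; simp
  | succ k ih =>
    intro t
    rw [List.range_succ, List.foldl_append, ih (Nat.le_of_succ_le hi)]
    simp [pvTake_succ_prod x k (Nat.lt_of_succ_le hi), mul_assoc]

theorem pvA_sum (x : List Int) :
    ((List.range x.length).map (fun i => (x.take (i + 1)).prod)).sum = pvS x := by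
  induction x with
  | nil => simp [pvS]
  | cons v t ih =>
    rw [List.length_cons, List.range_succ_eq_map, List.map_cons, List.map_map, List.sum_cons]
    have hmap : (List.range t.length).map ((fun i => ((v :: t).take (i + 1)).prod) ∘ Nat.succ)
        = (List.range t.length).map (fun i => v * (t.take (i + 1)).prod) :=
      List.map_congr_left (fun i _ => by simp [List.take_cons])
    rw [hmap, List.sum_map_mul_left, ih]
    simp [pvS]
    ring

theorem pvA_eq (x : List Int) : iterativeGeomSeries x = pvS x := by
  by_cases hx : x = []
  · simp [iterativeGeomSeries, hx, pvS]
  · rw [iterativeGeomSeries, if_neg hx]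
    rw [pvFoldl_congr (List.range x.length) _
        (fun acc i => acc + (x.take (i + 1)).prod) 0 ?_]
    · rw [pvFoldl_add, zero_add, pvA_sum]
    · intro i hi b
      have hlt : i < x.length := List.mem_range.mp hi
      show b + (if 0 < i then (List.range i).foldl (fun s j => s * x.getD j 0) (x.getD i 0)
          else x.getD i 0) = b + (x.take (i + 1)).prod
      by_cases h0 : 0 < i
      · rw [if_pos h0, pvInner x i (Nat.le_of_lt hlt)]
        rw [pvTake_succ_prod x i hlt]
        ring_nf
      · have : i = 0 := by omega
        subst this
        simp [pvTake_succ_prod x 0 hlt]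

-- ===== VERDICT (by name: the statement is the Claim_ definition above) =====
theorem iterativeGeomSeries_spec : Claim_equal_iterativeGeomSeries := by
  intro x _
  unfold Spec_iterativeGeomSeries iterativeGeomSeries_alt
  rw [pvB_inv, pvA_eq]
  ring
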